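-- pv_equiv track=rewrite | github.com/angelmariamshibu/Exam_Timetable_Scheduler | app.py | build_adjacency_matrix
-- ===== SOURCE A (Python) =====
-- def build_adjacency_matrix(subjects: list, conflicts: list) -> list:
--     """
--     Build Adjacency Matrix for the conflict graph.
--     A[i][j] = 1 if subject i and subject j conflict, else 0.
--     This is the matrix representation of the binary relation R on subjects.
--     """
--     n = len(subjects)
--     matrix = [[0] * n for _ in range(n)]
--     idx = {s: i for i, s in enumerate(subjects)}
--
--     for (a, b) in conflicts:
--         if a in idx and b in idx:
--             i, j = idx[a], idx[b]
--             matrix[i][j] = 1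
--             matrix[j][i] = 1  # symmetric relation
--
--     return matrix
-- ===== SOURCE B (Python) =====
-- def build_adjacency_matrix(subjects: list, conflicts: list) -> list:
--     """
--     Build the same symmetric adjacency matrix, but by first collecting the
--     set E of directed index edges and then generating every cell with a
--     membership test, instead of scatter-writing into a zero matrix.
--     """
--     n = len(subjects)
--     idx = {s: i for i, s in enumerate(subjects)}
--     E = set()
--     for (a, b) in conflicts:
--         if a in idx and b in idx:
--             i, j = idx[a], idx[b]
--             E.add((i, j))
--             E.add((j, i))
--     return [[1 if (i, j) in E else 0 for j in range(n)] for i in range(n)]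
-- ===== Notes on version B (the rewrite author's own statement) =====
-- stated objective: alternative
-- what changed: B replaces A's scatter-writes into a pre-allocated zero matrix by first building a set E of directed index-edge pairs and then generating every cell of the matrix with a membership test (i,j) in E.
import Mathlib
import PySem

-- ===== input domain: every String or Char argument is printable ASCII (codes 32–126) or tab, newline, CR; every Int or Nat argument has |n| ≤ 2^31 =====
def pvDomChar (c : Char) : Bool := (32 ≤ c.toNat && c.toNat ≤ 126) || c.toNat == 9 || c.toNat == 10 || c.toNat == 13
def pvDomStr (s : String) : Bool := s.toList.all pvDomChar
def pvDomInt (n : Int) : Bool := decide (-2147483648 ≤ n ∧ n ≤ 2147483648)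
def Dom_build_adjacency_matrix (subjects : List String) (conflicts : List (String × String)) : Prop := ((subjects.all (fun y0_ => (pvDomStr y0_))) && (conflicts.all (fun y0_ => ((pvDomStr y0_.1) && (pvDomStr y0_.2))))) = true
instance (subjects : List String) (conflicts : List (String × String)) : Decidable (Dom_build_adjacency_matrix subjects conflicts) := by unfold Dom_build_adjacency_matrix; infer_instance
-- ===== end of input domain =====

-- B builds a set of directed index edges first and then generates every cell by membership,
-- instead of A's scatter-writes into a pre-allocated zero matrix (objective: alternative).

-- ===== PORT A =====
-- matrix[i][j] = 1; matrix[j][i] = 1 — indices coming from idx are always in [0, n),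
-- so the total forms pyGetD/pySetD are exact here (Python never raises on these accesses).
def build_adjacency_matrix (subjects : List String) (conflicts : List (String × String)) : List (List Int) :=
  let n := subjects.length
  let matrix : List (List Int) := List.replicate n (List.replicate n (0 : Int))
  let idx : PySem.Dict String Int :=
    (PySem.List.enumerate subjects).foldl (fun d p => d.insert p.2 p.1) PySem.Dict.empty
  conflicts.foldl (fun m ab =>
    match idx.get? ab.1, idx.get? ab.2 with
    | some i, some j =>
      let m1 := PySem.List.pySetD m i (PySem.List.pySetD (PySem.List.pyGetD m i []) j 1)
      PySem.List.pySetD m1 j (PySem.List.pySetD (PySem.List.pyGetD m1 j []) i 1)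
    | _, _ => m) matrix

-- ===== PORT B =====
def build_adjacency_matrix_alt (subjects : List String) (conflicts : List (String × String)) : List (List Int) :=
  let n := subjects.length
  let idx : PySem.Dict String Int :=
    (PySem.List.enumerate subjects).foldl (fun d p => d.insert p.2 p.1) PySem.Dict.empty
  let E : PySem.Set (Int × Int) := conflicts.foldl (fun e ab =>
    match idx.get? ab.1 with
    | none => e
    | some i =>
      match idx.get? ab.2 with
      | none => e
      | some j => PySem.Set.add (PySem.Set.add e (i, j)) (j, i)) PySem.Set.empty
  (PySem.List.pyRange 0 n 1).map (fun i =>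
    (PySem.List.pyRange 0 n 1).map (fun j =>
      if PySem.Set.contains E (i, j) then (1 : Int) else 0))

-- ===== PRECONDITION & SPEC =====
def Spec_build_adjacency_matrix (subjects : List String) (conflicts : List (String × String)) (out : List (List Int)) : Prop := out = build_adjacency_matrix_alt subjects conflicts
instance (subjects : List String) (conflicts : List (String × String)) (out : List (List Int)) : Decidable (Spec_build_adjacency_matrix subjects conflicts out) := by unfold Spec_build_adjacency_matrix; infer_instance

-- ===== CLAIM (what is proved, stated in full; the proofs are below) =====
def Claim_equal_build_adjacency_matrix : Prop := ∀ (subjects : List String) (conflicts : List (String × String)), Dom_build_adjacency_matrix subjects conflicts → Spec_build_adjacency_matrix subjects conflicts (build_adjacency_matrix subjects conflicts)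

-- ===== LEMMAS AND PROOFS =====

-- All values stored in the idx dictionary are indices into subjects.
theorem pvIdx_foldl_range (L : List (Int × String)) (d : PySem.Dict String Int)
    (s : String) (i : Int)
    (h : (L.foldl (fun d p => d.insert p.2 p.1) d).get? s = some i) :
    (∃ p ∈ L, p.1 = i) ∨ d.get? s = some i := by
  induction L generalizing d with
  | nil => exact Or.inr h
  | cons p L ih =>
    simp only [List.foldl_cons] at h
    rcases ih _ h with h' | h'
    · obtain ⟨q, hq, hq1⟩ := h'
      exact Or.inl ⟨q, List.mem_cons_of_mem _ hq, hq1⟩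
    · by_cases hs : s = p.2
      · subst hs
        rw [PySem.Dict.get?_insert_self] at h'
        exact Or.inl ⟨p, List.mem_cons_self, by injection h'⟩
      · rw [PySem.Dict.get?_insert_of_ne _ _ hs] at h'
        exact Or.inr h'

-- the idx dictionary (as inlined in both ports), for the proofs below
def pvIdxA (subjects : List String) : PySem.Dict String Int :=
  (PySem.List.enumerate subjects).foldl (fun d p => d.insert p.2 p.1) PySem.Dict.empty

theorem pvIdx_range (subjects : List String) (s : String) (i : Int)
    (h : (pvIdxA subjects).get? s = some i) :
    0 ≤ i ∧ i < (subjects.length : Int) := by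
  rcases pvIdx_foldl_range _ _ _ _ h with h' | h'
  · obtain ⟨p, hp, hp1⟩ := h'
    rw [PySem.List.mem_enumerate_iff] at hp
    obtain ⟨k, hk, rfl⟩ := hp
    simp at hp1
    omega
  · simp [PySem.Dict.get?_empty] at h'

-- cell m p q = m[p][q] read totally
def pvCell (m : List (List Int)) (p q : Nat) : Int := ((m[p]?.getD [])[q]?.getD 0)

-- the invariant tying A's matrix to B's edge set
def pvInv (n : Nat) (m : List (List Int)) (e : PySem.Set (Int × Int)) : Prop :=
  m.length = n ∧ (∀ r ∈ m, r.length = n) ∧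
  ∀ p q : Nat, p < n → q < n →
    pvCell m p q = (if PySem.Set.contains e ((p : Int), (q : Int)) then 1 else 0)

theorem pvInv_init (n : Nat) :
    pvInv n (List.replicate n (List.replicate n (0 : Int))) PySem.Set.empty := by
  refine ⟨List.length_replicate, fun r hr => ?_, fun p q hp hq => ?_⟩
  · rw [List.eq_of_mem_replicate hr]; exact List.length_replicate
  · simp [pvCell, PySem.Set.empty, hp, hq]

theorem pvInv_step (n : Nat) (m : List (List Int)) (e : PySem.Set (Int × Int))
    (i j : Int) (hi : 0 ≤ i ∧ i < (n : Int)) (hj : 0 ≤ j ∧ j < (n : Int))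
    (h : pvInv n m e) :
    pvInv n
      (PySem.List.pySetD
        (PySem.List.pySetD m i (PySem.List.pySetD (PySem.List.pyGetD m i []) j 1)) j
        (PySem.List.pySetD
          (PySem.List.pyGetD (PySem.List.pySetD m i (PySem.List.pySetD (PySem.List.pyGetD m i []) j 1)) j [])
          i 1))
      (PySem.Set.add (PySem.Set.add e (i, j)) (j, i)) := by
  obtain ⟨it, rfl⟩ : ∃ k : Nat, i = (k : Int) := ⟨i.toNat, by omega⟩
  obtain ⟨jt, rfl⟩ : ∃ k : Nat, j = (k : Int) := ⟨j.toNat, by omega⟩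
  obtain ⟨h1, h2, h3⟩ := h
  have hit : it < n := by exact_mod_cast hi.2
  have hjt : jt < n := by exact_mod_cast hj.2
  have hitm : it < m.length := by omega
  have hjtm : jt < m.length := by omega
  simp only [PySem.List.pySetD_natCast, PySem.List.pyGetD_natCast]
  have hrow0 : m.getD it [] = m[it] := List.getD_eq_getElem m [] hitm
  have hlen1 : (m.set it ((m.getD it []).set jt 1)).length = m.length := List.length_set ..
  have hrow1len : ((m.getD it []).set jt 1).length = n := by
    rw [List.length_set, hrow0]; exact h2 _ (List.getElem_mem hitm)
  have hrowlen : ∀ r ∈ m.set it ((m.getD it []).set jt 1), r.length = n := by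
    intro r hr
    rcases List.mem_or_eq_of_mem_set hr with hr | rfl
    · exact h2 r hr
    · exact hrow1len
  refine ⟨by simpa [hlen1] using h1, ?_, ?_⟩
  · intro r hr
    rcases List.mem_or_eq_of_mem_set hr with hr | rfl
    · exact hrowlen r hr
    · rw [List.length_set,
        List.getD_eq_getElem _ [] (by rw [hlen1]; exact hjtm)]
      exact hrowlen _ (List.getElem_mem _)
  · intro p q hp hq
    have hmem : (((e.add ((it:Int), (jt:Int))).add ((jt:Int), (it:Int))).contains ((p:Int), (q:Int)) = true) ↔ ((p = jt ∧ q = it) ∨ (p = it ∧ q = jt) ∨ e.contains ((p:Int),(q:Int)) = true) := by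
      rw [PySem.Set.contains_iff, PySem.Set.mem_add, PySem.Set.mem_add, ← PySem.Set.contains_iff]
      simp only [Prod.ext_iff, Nat.cast_inj]
      tauto
    have hpv := h3 p q hp hq
    simp only [hmem, pvCell, List.getD_eq_getElem?_getD, List.getElem?_set] at hpv ⊢
    split_ifs at hpv ⊢ <;> simp_all [List.getElem_set] <;> omega

theorem pvInv_fold (subjects : List String) (conflicts : List (String × String))
    (m : List (List Int)) (e : PySem.Set (Int × Int))
    (h : pvInv subjects.length m e) :
    pvInv subjects.length
      (conflicts.foldl (fun m ab =>
        match (pvIdxA subjects).get? ab.1, (pvIdxA subjects).get? ab.2 with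
        | some i, some j =>
          let m1 := PySem.List.pySetD m i (PySem.List.pySetD (PySem.List.pyGetD m i []) j 1)
          PySem.List.pySetD m1 j (PySem.List.pySetD (PySem.List.pyGetD m1 j []) i 1)
        | _, _ => m) m)
      (conflicts.foldl (fun e ab =>
        match (pvIdxA subjects).get? ab.1 with
        | none => e
        | some i =>
          match (pvIdxA subjects).get? ab.2 with
          | none => e
          | some j => PySem.Set.add (PySem.Set.add e (i, j)) (j, i)) e) := by
  induction conflicts generalizing m e with
  | nil => exact h
  | cons ab rest ih =>
    simp only [List.foldl_cons]
    cases hA : (pvIdxA subjects).get? ab.1 with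
    | none => exact ih m e h
    | some i =>
      cases hB : (pvIdxA subjects).get? ab.2 with
      | none => exact ih m e h
      | some j =>
        exact ih _ _ (pvInv_step _ _ _ _ _ (pvIdx_range _ _ _ hA) (pvIdx_range _ _ _ hB) h)

theorem pvInv_final (n : Nat) (m : List (List Int)) (e : PySem.Set (Int × Int))
    (h : pvInv n m e) :
    m = (PySem.List.pyRange 0 n 1).map (fun i =>
      (PySem.List.pyRange 0 n 1).map (fun j =>
        if PySem.Set.contains e (i, j) then (1 : Int) else 0)) := by
  obtain ⟨h1, h2, h3⟩ := h
  rw [PySem.List.pyRange_zero_natCast, List.map_map]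
  apply List.ext_getElem
  · simp [h1]
  · intro p hp1 hp2
    simp only [List.getElem_map, List.getElem_range, Function.comp]
    have hpm : m[p] ∈ m := List.getElem_mem _
    apply List.ext_getElem
    · rw [h2 _ hpm]; simp
    · intro q hq1 hq2
      simp only [List.getElem_map, List.getElem_range]
      have hpn : p < n := by omega
      have hqn : q < n := by rw [h2 _ hpm] at hq1; exact hq1
      have := h3 p q hpn hqn
      simpa [pvCell, List.getElem?_eq_getElem, hp1, hq1] using this

-- ===== VERDICT (by name: the statement is the Claim_ definition above) =====
theorem build_adjacency_matrix_spec : Claim_equal_build_adjacency_matrix := by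
  intro subjects conflicts _
  unfold Spec_build_adjacency_matrix build_adjacency_matrix build_adjacency_matrix_alt
  exact pvInv_final _ _ _ (pvInv_fold subjects conflicts _ _ (pvInv_init _))
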